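-- pv_equiv track=rewrite | github.com/k-harada/AtCoder | ARC/ARC113/A.py | solve
-- ===== SOURCE A (Python) =====
-- def solve(k):
--     res = 0
--     # a < b < c
--     for a in range(1, k + 1):
--         if a ** 3 > k:
--             break
--         for b in range(a + 1, k + 1):
--             c_max = k // (a * b)
--             if c_max > b:
--                 res += 6 * (c_max - b)
--             else:
--                 break
--     # a = b < c
--     for a in range(1, k + 1):
--         if a ** 3 > k:
--             break
--         b = a
--         c_max = k // (a * b)
--         if c_max > b:
--             res += 3 * (c_max - b)
--     # a < b = c
--     for a in range(1, k + 1):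
--         if a ** 3 > k:
--             break
--         for b in range(a + 1, k + 1):
--             if a * b * b <= k:
--                 res += 3
--             else:
--                 break
--     # a = b = c
--     for a in range(1, k + 1):
--         if a ** 3 > k:
--             break
--         else:
--             res += 1
--     return res
-- ===== SOURCE B (Python) =====
-- def pair_count(m):
--     # number of ordered pairs (b, c) of positive ints with b*c <= m (hyperbola method)
--     t = 0
--     s = 0
--     b = 1
--     while b * b <= m:
--         t += m // b
--         s = b
--         b += 1
--     return 2 * t - s * s
--
-- def solve(k):
--     res = 0
--     a = 1
--     while a <= k:
--         q = k // a
--         a2 = k // q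
--         res += (a2 - a + 1) * pair_count(q)
--         a = a2 + 1
--     return res
-- ===== Notes on version B (the rewrite author's own statement) =====
-- stated objective: alternative
-- what changed: Replaced A's four symmetry-class loops (weights six/three/three/one over sorted representatives with break pruning) by a direct count of ordered triples: an outer loop grouped by the distinct values of k//a, multiplying each block length by the number of pairs (b,c) with b*c <= k//a, itself computed by the hyperbola identity (twice the divisor-sum up to the integer square root, minus its square).
import Mathlib
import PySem

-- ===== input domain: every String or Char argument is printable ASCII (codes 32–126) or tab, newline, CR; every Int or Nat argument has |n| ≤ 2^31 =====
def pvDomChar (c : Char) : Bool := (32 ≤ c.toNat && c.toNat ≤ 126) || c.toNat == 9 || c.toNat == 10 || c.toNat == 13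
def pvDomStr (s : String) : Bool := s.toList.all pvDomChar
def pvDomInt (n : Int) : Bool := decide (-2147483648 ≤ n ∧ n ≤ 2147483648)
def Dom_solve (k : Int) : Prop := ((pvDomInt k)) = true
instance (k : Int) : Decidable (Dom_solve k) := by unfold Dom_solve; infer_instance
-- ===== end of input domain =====

-- B replaces A's four symmetry-class loops (weights 6/3/3/1 with break pruning) by a direct
-- ordered count: an outer loop grouped by the distinct values of k//a times a hyperbola
-- pair count; an alternative algorithm, not claimed faster.

-- ===== PORT A =====
-- loop "a < b < c": inner loop over b with break
def solveL1b (k a : Int) : List Int → Int → Int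
  | [], res => res
  | b :: bs, res =>
    let cmax := PySem.Int.floordiv k (a * b)
    if cmax > b then solveL1b k a bs (res + 6 * (cmax - b)) else res

def solveL1 (k : Int) : List Int → Int → Int
  | [], res => res
  | a :: as_, res =>
    if a ^ 3 > k then res
    else solveL1 k as_ (solveL1b k a (PySem.List.pyRange (a + 1) (k + 1) 1) res)

-- loop "a = b < c"
def solveL2 (k : Int) : List Int → Int → Int
  | [], res => res
  | a :: as_, res =>
    if a ^ 3 > k then res
    else
      let b := a
      let cmax := PySem.Int.floordiv k (a * b)
      solveL2 k as_ (if cmax > b then res + 3 * (cmax - b) else res)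

-- loop "a < b = c": inner loop over b with break
def solveL3b (k a : Int) : List Int → Int → Int
  | [], res => res
  | b :: bs, res =>
    if a * b * b ≤ k then solveL3b k a bs (res + 3) else res

def solveL3 (k : Int) : List Int → Int → Int
  | [], res => res
  | a :: as_, res =>
    if a ^ 3 > k then res
    else solveL3 k as_ (solveL3b k a (PySem.List.pyRange (a + 1) (k + 1) 1) res)

-- loop "a = b = c"
def solveL4 (k : Int) : List Int → Int → Int
  | [], res => res
  | a :: as_, res => if a ^ 3 > k then res else solveL4 k as_ (res + 1)

def solve (k : Int) : Int :=
  let r1 := solveL1 k (PySem.List.pyRange 1 (k + 1) 1) 0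
  let r2 := solveL2 k (PySem.List.pyRange 1 (k + 1) 1) r1
  let r3 := solveL3 k (PySem.List.pyRange 1 (k + 1) 1) r2
  solveL4 k (PySem.List.pyRange 1 (k + 1) 1) r3

-- ===== PORT B =====
-- hyperbola count of pairs (b, c) with b * c <= m; (t, s) are the loop's two variables
def pairCountLoop (m b t s : Int) : Int × Int :=
  if h : b * b ≤ m then pairCountLoop m (b + 1) (t + PySem.Int.floordiv m b) b
  else (t, s)
  termination_by (m + 1 - b).toNat
  decreasing_by
    have hm : 0 ≤ m := le_trans (mul_self_nonneg b) h
    have hbm : b ≤ m := by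
      by_cases hb : b ≤ 0
      · omega
      · nlinarith
    omega

def pairCount (m : Int) : Int :=
  let ts := pairCountLoop m 1 0 0
  2 * ts.1 - ts.2 * ts.2

-- outer while loop, grouped by the distinct values of k // a; the Nat fuel only
-- makes the recursion structural (the call below always supplies enough)
def solveAltLoop (k : Int) : Nat → Int → Int → Int
  | 0, _, res => res
  | fuel + 1, a, res =>
    if a ≤ k then
      let q := PySem.Int.floordiv k a
      let a2 := PySem.Int.floordiv k q
      solveAltLoop k fuel (a2 + 1) (res + (a2 - a + 1) * pairCount q)
    else res

def solve_alt (k : Int) : Int := solveAltLoop k (k.toNat + 1) 1 0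

-- ===== PRECONDITION & SPEC =====
def Spec_solve (k : Int) (out : Int) : Prop := out = solve_alt k
instance (k : Int) (out : Int) : Decidable (Spec_solve k out) := by unfold Spec_solve; infer_instance

-- ===== CLAIM (what is proved, stated in full; the proofs are below) =====
def Claim_equal_solve : Prop := ∀ (k : Int), Dom_solve k → Spec_solve k (solve k)

-- ===== LEMMAS AND PROOFS =====

-- notation shortcuts used only in proofs
noncomputable def pvI (k : Int) : Finset Int := Finset.Icc 1 k
def pvE (k a b c : Int) : Int := if a * b * c ≤ k then 1 else 0

noncomputable def pvU1 (k : Int) : Int :=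
  ∑ a ∈ pvI k, ∑ b ∈ (pvI k).filter (a < ·), ∑ c ∈ (pvI k).filter (b < ·), pvE k a b c
noncomputable def pvU2 (k : Int) : Int := ∑ a ∈ pvI k, ∑ c ∈ (pvI k).filter (a < ·), pvE k a a c
noncomputable def pvU3 (k : Int) : Int := ∑ a ∈ pvI k, ∑ b ∈ (pvI k).filter (a < ·), pvE k a b b
noncomputable def pvU4 (k : Int) : Int := ∑ a ∈ pvI k, pvE k a a a
noncomputable def pvT (k : Int) : Int := ∑ a ∈ pvI k, ∑ b ∈ pvI k, ∑ c ∈ pvI k, pvE k a b c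

-- generic loop-with-break used only in proofs
def pvBrk (p : Int → Bool) (step : Int → Int) : List Int → Int → Int
  | [], r => r
  | x :: xs, r => if p x then pvBrk p step xs (r + step x) else r

lemma pvBrk_shift (p : Int → Bool) (step : Int → Int) (l : List Int) (r : Int) :
    pvBrk p step l r = r + pvBrk p step l 0 := by
  induction l generalizing r with
  | nil => simp [pvBrk]
  | cons x xs ih =>
    simp only [pvBrk]
    by_cases h : p x
    · rw [if_pos h, if_pos h, ih (r + step x), ih (0 + step x)]; ring
    · simp [h]

lemma pvBrk_eq_sum (p : Int → Bool) (step : Int → Int) (l : List Int) (r : Int)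
    (hl : l.Pairwise (· < ·))
    (hmono : ∀ x y, x ∈ l → y ∈ l → x ≤ y → p y = true → p x = true) :
    pvBrk p step l r = r + ((l.filter p).map step).sum := by
  induction l generalizing r with
  | nil => simp [pvBrk]
  | cons x xs ih =>
    rcases List.pairwise_cons.mp hl with ⟨hx, hxs⟩
    simp only [pvBrk]
    by_cases h : p x
    · rw [if_pos h, ih _ hxs (fun a b ha hb hab hpb =>
        hmono a b (List.mem_cons_of_mem _ ha) (List.mem_cons_of_mem _ hb) hab hpb),
        List.filter_cons_of_pos h]
      simp; ring
    · rw [if_neg h, List.filter_cons_of_neg h]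
      have : xs.filter p = [] := by
        apply List.filter_eq_nil_iff.mpr
        intro y hy hpy
        exact h (hmono x y (List.mem_cons_self) (List.mem_cons_of_mem _ hy) (le_of_lt (hx y hy)) hpy)
      simp [this]

-- sums over pyRange lists as Finset sums over Icc
lemma pvSum_map_range (f : Nat → Int) (n : Nat) :
    ((List.range n).map f).sum = ∑ i ∈ Finset.range n, f i := by
  induction n with
  | zero => simp
  | succ m ih => simp [List.range_succ, Finset.sum_range_succ, ih]

lemma pvSum_Icc (lo hi : Int) (f : Int → Int) :
    ∑ x ∈ Finset.Icc lo hi, f x = ∑ i ∈ Finset.range (hi + 1 - lo).toNat, f (lo + i) := by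
  apply Finset.sum_nbij' (fun x => (x - lo).toNat) (fun i => lo + (i : Int))
  · intro x hx
    rw [Finset.mem_Icc] at hx
    rw [Finset.mem_range]
    omega
  · intro i hi'
    rw [Finset.mem_range] at hi'
    rw [Finset.mem_Icc]
    omega
  · intro x hx
    rw [Finset.mem_Icc] at hx
    omega
  · intro i hi'
    rw [Finset.mem_range] at hi'
    omega
  · intro x hx
    rw [Finset.mem_Icc] at hx
    congr 1
    omega

lemma pvSum_pyRange (lo hi : Int) (f : Int → Int) :
    ((PySem.List.pyRange lo (hi + 1) 1).map f).sum = ∑ x ∈ Finset.Icc lo hi, f x := by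
  rw [PySem.List.pyRange_one, List.map_map, pvSum_map_range, pvSum_Icc]
  have : (hi + 1 - lo).toNat = (hi + 1 - lo).toNat := rfl
  apply Finset.sum_congr rfl
  intro i _
  simp

lemma pvSum_filter_map (p : Int → Bool) (f : Int → Int) (l : List Int) :
    ((l.filter p).map f).sum = (l.map (fun x => if p x then f x else 0)).sum := by
  induction l with
  | nil => rfl
  | cons x xs ih =>
    by_cases h : p x
    · simp [h, ih]
    · simp [h, ih]

lemma pvFilter_pyRange (lo hi : Int) (p : Int → Bool) (f : Int → Int) :
    (((PySem.List.pyRange lo (hi + 1) 1).filter p).map f).sum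
      = ∑ x ∈ (Finset.Icc lo hi).filter (fun x => p x = true), f x := by
  rw [pvSum_filter_map, pvSum_pyRange, Finset.sum_filter]

-- cube monotonicity
lemma pvCube_mono (x y : Int) (h0 : 0 ≤ x) (hxy : x ≤ y) : x ^ 3 ≤ y ^ 3 := by
  nlinarith [sq_nonneg x, sq_nonneg y, sq_nonneg (x + y)]

-- divisor antitonicity
lemma pvDiv_antitone (k d e : Int) (hk : 0 ≤ k) (hd : 0 < d) (hde : d ≤ e) : k / e ≤ k / d := by
  have he : 0 < e := lt_of_lt_of_le hd hde
  rw [Int.le_ediv_iff_mul_le hd]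
  calc k / e * d ≤ k / e * e :=
        mul_le_mul_of_nonneg_left hde (Int.ediv_nonneg hk (le_of_lt he))
    _ ≤ k := Int.ediv_mul_le k (ne_of_gt he)

-- key pruning fact: if a^3 > k then no b > a has b < k / (a*b)
lemma pvPrune (k a b : Int) (ha : 1 ≤ a) (hab : a < b) (h3 : k < a ^ 3) (hk : 0 ≤ k) :
    ¬ b < k / (a * b) := by
  have h1 : k / (a * b) ≤ k / (a * a) :=
    pvDiv_antitone k (a * a) (a * b) hk (by positivity) (by nlinarith)
  have h2 : k / (a * a) < a := by
    rw [Int.ediv_lt_iff_lt_mul (by positivity)]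
    nlinarith
  omega

-- counting lemmas: number of admissible c values
lemma pvCount_c (k a b : Int) (hk : 1 ≤ k) (ha : 1 ≤ a) (hb : 1 ≤ b) :
    (∑ c ∈ pvI k, pvE k a b c) = k / (a * b) := by
  have hab : (0:Int) < a * b := by positivity
  have hdvnn : 0 ≤ k / (a * b) := Int.ediv_nonneg (by omega) (le_of_lt hab)
  unfold pvI pvE
  rw [Finset.sum_boole]
  have hset : (Finset.Icc 1 k).filter (fun c => a * b * c ≤ k)
      = Finset.Icc 1 (k / (a * b)) := by
    ext c
    simp only [Finset.mem_filter, Finset.mem_Icc]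
    constructor
    · rintro ⟨⟨h1, h2⟩, h3⟩
      exact ⟨h1, by rw [Int.le_ediv_iff_mul_le hab]; nlinarith⟩
    · rintro ⟨h1, h2⟩
      have h3 : c * (a * b) ≤ k := (Int.le_ediv_iff_mul_le hab).mp h2
      have h4 : k / (a * b) ≤ k := Int.ediv_le_self _ (by omega)
      exact ⟨⟨h1, le_trans h2 h4⟩, by nlinarith⟩
  rw [hset, Int.card_Icc]
  have : (k / (a * b) + 1 - 1) = k / (a * b) := by ring
  rw [this, Int.toNat_of_nonneg hdvnn]

lemma pvCount_gt (k a b : Int) (hk : 1 ≤ k) (ha : 1 ≤ a) (hb : 1 ≤ b) :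
    (∑ c ∈ (pvI k).filter (b < ·), pvE k a b c)
      = if b < k / (a * b) then k / (a * b) - b else 0 := by
  have hab : (0:Int) < a * b := by positivity
  unfold pvI pvE
  rw [Finset.sum_boole]
  have hset : ((Finset.Icc 1 k).filter (b < ·)).filter (fun c => a * b * c ≤ k)
      = Finset.Icc (b + 1) (k / (a * b)) := by
    ext c
    simp only [Finset.mem_filter, Finset.mem_Icc]
    constructor
    · rintro ⟨⟨⟨h1, h2⟩, hbc⟩, h3⟩
      exact ⟨by omega, by rw [Int.le_ediv_iff_mul_le hab]; nlinarith⟩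
    · rintro ⟨h1, h2⟩
      have h3 : c * (a * b) ≤ k := (Int.le_ediv_iff_mul_le hab).mp h2
      have h4 : k / (a * b) ≤ k := Int.ediv_le_self _ (by omega)
      exact ⟨⟨⟨by omega, le_trans h2 h4⟩, by omega⟩, by nlinarith⟩
  rw [Finset.filter_filter] at hset ⊢
  rw [hset, Int.card_Icc]
  by_cases h : b < k / (a * b)
  · rw [if_pos h, Int.toNat_of_nonneg (by omega)]
    ring
  · rw [if_neg h]
    have : (k / (a * b) + 1 - (b + 1)).toNat = 0 := by omega
    rw [this]
    rfl

-- the four break-loops of A, written as pvBrk instances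
lemma pvL1b_brk (k a : Int) (l : List Int) (r : Int) :
    solveL1b k a l r
      = pvBrk (fun b => decide (b < PySem.Int.floordiv k (a * b)))
          (fun b => 6 * (PySem.Int.floordiv k (a * b) - b)) l r := by
  induction l generalizing r with
  | nil => rfl
  | cons b bs ih =>
    simp only [solveL1b, pvBrk, decide_eq_true_eq, gt_iff_lt]
    split_ifs with h
    · exact ih _
    · rfl

lemma pvL3b_brk (k a : Int) (l : List Int) (r : Int) :
    solveL3b k a l r
      = pvBrk (fun b => decide (a * b * b ≤ k)) (fun _ => 3) l r := by
  induction l generalizing r with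
  | nil => rfl
  | cons b bs ih =>
    simp only [solveL3b, pvBrk, decide_eq_true_eq]
    split_ifs with h
    · exact ih _
    · rfl

lemma pvL1_brk (k : Int) (l : List Int) (r : Int) :
    solveL1 k l r
      = pvBrk (fun a => decide (a ^ 3 ≤ k))
          (fun a => solveL1b k a (PySem.List.pyRange (a + 1) (k + 1) 1) 0) l r := by
  induction l generalizing r with
  | nil => rfl
  | cons a as_ ih =>
    simp only [solveL1, pvBrk, decide_eq_true_eq]
    by_cases h : a ^ 3 > k
    · rw [if_pos h, if_neg (by omega)]
    · rw [if_neg h, if_pos (by omega)]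
      have hx : solveL1b k a (PySem.List.pyRange (a + 1) (k + 1) 1) r
          = r + solveL1b k a (PySem.List.pyRange (a + 1) (k + 1) 1) 0 := by
        rw [pvL1b_brk, pvBrk_shift]
        rw [← pvL1b_brk]
      rw [ih, hx]

lemma pvL3_brk (k : Int) (l : List Int) (r : Int) :
    solveL3 k l r
      = pvBrk (fun a => decide (a ^ 3 ≤ k))
          (fun a => solveL3b k a (PySem.List.pyRange (a + 1) (k + 1) 1) 0) l r := by
  induction l generalizing r with
  | nil => rfl
  | cons a as_ ih =>
    simp only [solveL3, pvBrk, decide_eq_true_eq]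
    by_cases h : a ^ 3 > k
    · rw [if_pos h, if_neg (by omega)]
    · rw [if_neg h, if_pos (by omega)]
      have hx : solveL3b k a (PySem.List.pyRange (a + 1) (k + 1) 1) r
          = r + solveL3b k a (PySem.List.pyRange (a + 1) (k + 1) 1) 0 := by
        rw [pvL3b_brk, pvBrk_shift]
        rw [← pvL3b_brk]
      rw [ih, hx]

lemma pvL2_brk (k : Int) (l : List Int) (r : Int) :
    solveL2 k l r
      = pvBrk (fun a => decide (a ^ 3 ≤ k))
          (fun a =>
            if PySem.Int.floordiv k (a * a) > a
            then 3 * (PySem.Int.floordiv k (a * a) - a) else 0) l r := by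
  induction l generalizing r with
  | nil => rfl
  | cons a as_ ih =>
    simp only [solveL2, pvBrk, decide_eq_true_eq]
    by_cases h : a ^ 3 > k
    · rw [if_pos h, if_neg (by omega)]
    · rw [if_neg h, ih, if_pos (show a ^ 3 ≤ k by omega)]
      congr 1
      split_ifs with h2
      · rfl
      · ring

lemma pvL4_brk (k : Int) (l : List Int) (r : Int) :
    solveL4 k l r = pvBrk (fun a => decide (a ^ 3 ≤ k)) (fun _ => 1) l r := by
  induction l generalizing r with
  | nil => rfl
  | cons a as_ ih =>
    simp only [solveL4, pvBrk, decide_eq_true_eq]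
    by_cases h : a ^ 3 > k
    · rw [if_pos h, if_neg (by omega)]
    · rw [if_neg h, if_pos (by omega), ih]

-- monotone-predicate facts on the ranges, packaged for pvBrk_eq_sum
lemma pvMono_cube (k : Int) :
    ∀ x y, x ∈ PySem.List.pyRange 1 (k + 1) 1 → y ∈ PySem.List.pyRange 1 (k + 1) 1 →
      x ≤ y → decide (y ^ 3 ≤ k) = true → decide (x ^ 3 ≤ k) = true := by
  intro x y hx hy hxy h
  rw [PySem.List.mem_pyRange_one] at hx
  rw [decide_eq_true_eq] at h ⊢
  exact le_trans (pvCube_mono x y (by omega) hxy) h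

lemma pvMono_L1b (k a : Int) (ha : 1 ≤ a) (hk : 0 ≤ k) :
    ∀ x y, x ∈ PySem.List.pyRange (a + 1) (k + 1) 1 → y ∈ PySem.List.pyRange (a + 1) (k + 1) 1 →
      x ≤ y → decide (y < PySem.Int.floordiv k (a * y)) = true →
      decide (x < PySem.Int.floordiv k (a * x)) = true := by
  intro x y hx hy hxy h
  rw [PySem.List.mem_pyRange_one] at hx hy
  rw [decide_eq_true_eq] at h ⊢
  have hax : (0:Int) < a * x := by nlinarith
  have hay : (0:Int) < a * y := by nlinarith
  rw [PySem.Int.floordiv_eq_ediv_of_pos hay] at h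
  rw [PySem.Int.floordiv_eq_ediv_of_pos hax]
  have := pvDiv_antitone k (a * x) (a * y) hk hax (by nlinarith)
  omega

lemma pvMono_L3b (k a : Int) (ha : 1 ≤ a) :
    ∀ x y, x ∈ PySem.List.pyRange (a + 1) (k + 1) 1 → y ∈ PySem.List.pyRange (a + 1) (k + 1) 1 →
      x ≤ y → decide (a * y * y ≤ k) = true → decide (a * x * x ≤ k) = true := by
  intro x y hx hy hxy h
  rw [PySem.List.mem_pyRange_one] at hx hy
  rw [decide_eq_true_eq] at h ⊢
  have hxx : x * x ≤ y * y := by nlinarith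
  nlinarith [hxx, mul_le_mul_of_nonneg_left hxx (show (0:Int) ≤ a by omega)]

-- inner loops evaluated to interval sums (and floordiv rewritten to ediv)
lemma pvInner1_sum (k a r : Int) (hk : 1 ≤ k) (ha : 1 ≤ a) :
    solveL1b k a (PySem.List.pyRange (a + 1) (k + 1) 1) r
      = r + ∑ b ∈ (Finset.Icc (a + 1) k).filter (fun b => b < k / (a * b)),
          6 * (k / (a * b) - b) := by
  rw [pvL1b_brk, pvBrk_eq_sum _ _ _ _ (PySem.List.pairwise_lt_pyRange_one _ _)
    (pvMono_L1b k a ha (by omega)), pvFilter_pyRange]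
  congr 1
  rw [show ((Finset.Icc (a + 1) k).filter
      (fun x => decide (x < PySem.Int.floordiv k (a * x)) = true))
      = ((Finset.Icc (a + 1) k).filter (fun b => b < k / (a * b))) from
    Finset.filter_congr (by
      intro x hx
      rw [Finset.mem_Icc] at hx
      have hax : (0:Int) < a * x := by nlinarith
      simp [PySem.Int.floordiv_eq_ediv_of_pos hax])]
  apply Finset.sum_congr rfl
  intro x hx
  rw [Finset.mem_filter, Finset.mem_Icc] at hx
  have hax : (0:Int) < a * x := by nlinarith [hx.1.1, hx.1.2]
  rw [PySem.Int.floordiv_eq_ediv_of_pos hax]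

lemma pvInner3_sum (k a r : Int) (hk : 1 ≤ k) (ha : 1 ≤ a) :
    solveL3b k a (PySem.List.pyRange (a + 1) (k + 1) 1) r
      = r + ∑ _b ∈ (Finset.Icc (a + 1) k).filter (fun b => a * b * b ≤ k), (3:Int) := by
  rw [pvL3b_brk, pvBrk_eq_sum _ _ _ _ (PySem.List.pairwise_lt_pyRange_one _ _)
    (pvMono_L3b k a ha), pvFilter_pyRange]
  congr 1
  apply Finset.sum_congr
  · apply Finset.filter_congr
    intro x hx
    simp
  · intro x hx; rfl

-- the four loops of A as sums over the a-range with the cube filter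
lemma pvL1_sum (k r : Int) (hk : 1 ≤ k) :
    solveL1 k (PySem.List.pyRange 1 (k + 1) 1) r
      = r + ∑ a ∈ (Finset.Icc 1 k).filter (fun a => a ^ 3 ≤ k),
          ∑ b ∈ (Finset.Icc (a + 1) k).filter (fun b => b < k / (a * b)),
            6 * (k / (a * b) - b) := by
  rw [pvL1_brk, pvBrk_eq_sum _ _ _ _ (PySem.List.pairwise_lt_pyRange_one _ _)
    (pvMono_cube k), pvFilter_pyRange]
  congr 1
  rw [show ((Finset.Icc 1 k).filter (fun x => decide (x ^ 3 ≤ k) = true))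
      = ((Finset.Icc 1 k).filter (fun a => a ^ 3 ≤ k)) from
    Finset.filter_congr (by intro x hx; simp)]
  apply Finset.sum_congr rfl
  intro a ha
  rw [Finset.mem_filter, Finset.mem_Icc] at ha
  rw [pvInner1_sum k a 0 hk ha.1.1]
  ring

lemma pvL3_sum (k r : Int) (hk : 1 ≤ k) :
    solveL3 k (PySem.List.pyRange 1 (k + 1) 1) r
      = r + ∑ a ∈ (Finset.Icc 1 k).filter (fun a => a ^ 3 ≤ k),
          ∑ _b ∈ (Finset.Icc (a + 1) k).filter (fun b => a * b * b ≤ k), (3:Int) := by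
  rw [pvL3_brk, pvBrk_eq_sum _ _ _ _ (PySem.List.pairwise_lt_pyRange_one _ _)
    (pvMono_cube k), pvFilter_pyRange]
  congr 1
  rw [show ((Finset.Icc 1 k).filter (fun x => decide (x ^ 3 ≤ k) = true))
      = ((Finset.Icc 1 k).filter (fun a => a ^ 3 ≤ k)) from
    Finset.filter_congr (by intro x hx; simp)]
  apply Finset.sum_congr rfl
  intro a ha
  rw [Finset.mem_filter, Finset.mem_Icc] at ha
  rw [pvInner3_sum k a 0 hk ha.1.1]
  ring

lemma pvL2_sum (k r : Int) (hk : 1 ≤ k) :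
    solveL2 k (PySem.List.pyRange 1 (k + 1) 1) r
      = r + ∑ a ∈ (Finset.Icc 1 k).filter (fun a => a ^ 3 ≤ k),
          (if a < k / (a * a) then 3 * (k / (a * a) - a) else 0) := by
  rw [pvL2_brk, pvBrk_eq_sum _ _ _ _ (PySem.List.pairwise_lt_pyRange_one _ _)
    (pvMono_cube k), pvFilter_pyRange]
  congr 1
  rw [show ((Finset.Icc 1 k).filter (fun x => decide (x ^ 3 ≤ k) = true))
      = ((Finset.Icc 1 k).filter (fun a => a ^ 3 ≤ k)) from
    Finset.filter_congr (by intro x hx; simp)]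
  apply Finset.sum_congr rfl
  intro a ha
  rw [Finset.mem_filter, Finset.mem_Icc] at ha
  have haa : (0:Int) < a * a := by nlinarith [ha.1.1]
  rw [PySem.Int.floordiv_eq_ediv_of_pos haa]

lemma pvL4_sum (k r : Int) (hk : 1 ≤ k) :
    solveL4 k (PySem.List.pyRange 1 (k + 1) 1) r
      = r + ∑ _a ∈ (Finset.Icc 1 k).filter (fun a => a ^ 3 ≤ k), (1:Int) := by
  rw [pvL4_brk, pvBrk_eq_sum _ _ _ _ (PySem.List.pairwise_lt_pyRange_one _ _)
    (pvMono_cube k), pvFilter_pyRange]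
  congr 1
  apply Finset.sum_congr
  · apply Finset.filter_congr
    intro x hx
    simp
  · intro x hx; rfl

lemma pvIcc_succ (k a : Int) (ha : 1 ≤ a) :
    Finset.Icc (a + 1) k = (pvI k).filter (a < ·) := by
  ext b
  simp only [pvI, Finset.mem_Icc, Finset.mem_filter]
  omega

lemma pvPrune_diag (k a : Int) (ha : 1 ≤ a) (h3 : k < a ^ 3) (hk : 0 ≤ k) :
    k / (a * a) < a := by
  rw [Int.ediv_lt_iff_lt_mul (by positivity)]
  nlinarith

-- A's first loop total is 6 · U1
lemma pvU1_eq (k : Int) (hk : 1 ≤ k) :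
    (∑ a ∈ (Finset.Icc 1 k).filter (fun a => a ^ 3 ≤ k),
      ∑ b ∈ (Finset.Icc (a + 1) k).filter (fun b => b < k / (a * b)),
        6 * (k / (a * b) - b)) = 6 * pvU1 k := by
  have hstep : ∀ a ∈ Finset.Icc 1 k,
      (∑ b ∈ (Finset.Icc (a + 1) k).filter (fun b => b < k / (a * b)),
        6 * (k / (a * b) - b))
      = 6 * ∑ b ∈ (pvI k).filter (a < ·), ∑ c ∈ (pvI k).filter (b < ·), pvE k a b c := by
    intro a ha
    rw [Finset.mem_Icc] at ha
    rw [pvIcc_succ k a ha.1, Finset.filter_filter, Finset.mul_sum]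
    rw [show ((pvI k).filter (fun b => a < b ∧ b < k / (a * b)))
        = ((pvI k).filter (a < ·)).filter (fun b => b < k / (a * b)) by
      rw [Finset.filter_filter]]
    rw [Finset.sum_filter]
    apply Finset.sum_congr rfl
    intro b hb
    rw [Finset.mem_filter, pvI, Finset.mem_Icc] at hb
    rw [pvCount_gt k a b hk ha.1 hb.1.1]
    split_ifs with h
    · rfl
    · ring
  rw [Finset.sum_congr rfl (fun a ha => hstep a (Finset.mem_of_mem_filter a ha))]
  rw [Finset.sum_filter_of_ne, pvU1, Finset.mul_sum]
  · rfl
  intro a ha hne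
  rw [Finset.mem_Icc] at ha
  by_contra h3
  apply hne
  rw [Finset.sum_eq_zero, mul_zero]
  intro b hb
  rw [Finset.mem_filter, pvI, Finset.mem_Icc] at hb
  rw [Finset.sum_eq_zero]
  intro c hc
  rw [Finset.mem_filter, pvI, Finset.mem_Icc] at hc
  unfold pvE
  rw [if_neg]
  intro habc
  have hab : (0:Int) < a * b := by nlinarith [ha.1, hb.1.1]
  have h1 : (b + 1) * (a * b) ≤ k := by
    nlinarith [mul_le_mul_of_nonneg_right (show b + 1 ≤ c by omega) (le_of_lt hab)]
  have hblt : b < k / (a * b) := by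
    have := (Int.le_ediv_iff_mul_le hab).mpr h1
    omega
  exact pvPrune k a b ha.1 hb.2 (by omega) (by omega) hblt

-- A's second loop total is 3 · U2
lemma pvU2_eq (k : Int) (hk : 1 ≤ k) :
    (∑ a ∈ (Finset.Icc 1 k).filter (fun a => a ^ 3 ≤ k),
      (if a < k / (a * a) then 3 * (k / (a * a) - a) else 0)) = 3 * pvU2 k := by
  rw [Finset.sum_filter_of_ne, pvU2, Finset.mul_sum]
  · apply Finset.sum_congr rfl
    intro a ha
    rw [Finset.mem_Icc] at ha
    rw [pvCount_gt k a a hk ha.1 ha.1]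
    split_ifs with h
    · ring
    · ring
  · intro a ha hne
    rw [Finset.mem_Icc] at ha
    by_contra h3
    apply hne
    rw [if_neg]
    have := pvPrune_diag k a ha.1 (by omega) (by omega)
    omega

-- A's third loop total is 3 · U3
lemma pvU3_eq (k : Int) (_hk : 1 ≤ k) :
    (∑ a ∈ (Finset.Icc 1 k).filter (fun a => a ^ 3 ≤ k),
      ∑ _b ∈ (Finset.Icc (a + 1) k).filter (fun b => a * b * b ≤ k), (3:Int))
      = 3 * pvU3 k := by
  have hstep : ∀ a ∈ Finset.Icc 1 k,
      (∑ _b ∈ (Finset.Icc (a + 1) k).filter (fun b => a * b * b ≤ k), (3:Int))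
      = 3 * ∑ b ∈ (pvI k).filter (a < ·), pvE k a b b := by
    intro a ha
    rw [Finset.mem_Icc] at ha
    rw [pvIcc_succ k a ha.1, Finset.filter_filter, Finset.mul_sum]
    rw [show ((pvI k).filter (fun b => a < b ∧ a * b * b ≤ k))
        = ((pvI k).filter (a < ·)).filter (fun b => a * b * b ≤ k) by
      rw [Finset.filter_filter]]
    rw [Finset.sum_filter]
    apply Finset.sum_congr rfl
    intro b hb
    unfold pvE
    split_ifs with h
    · rfl
    · ring
  rw [Finset.sum_congr rfl (fun a ha => hstep a (Finset.mem_of_mem_filter a ha))]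
  rw [Finset.sum_filter_of_ne, pvU3, Finset.mul_sum]
  · rfl
  intro a ha hne
  rw [Finset.mem_Icc] at ha
  by_contra h3
  apply hne
  rw [Finset.sum_eq_zero, mul_zero]
  intro b hb
  rw [Finset.mem_filter, pvI, Finset.mem_Icc] at hb
  unfold pvE
  rw [if_neg]
  intro habb
  have h1 : a * a ≤ b * b := by nlinarith [ha.1, hb.2]
  have h2 : a * (a * a) ≤ a * (b * b) := mul_le_mul_of_nonneg_left h1 (by omega)
  nlinarith [h2]

-- A's fourth loop total is U4
lemma pvU4_eq (k : Int) (_hk : 1 ≤ k) :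
    (∑ _a ∈ (Finset.Icc 1 k).filter (fun a => a ^ 3 ≤ k), (1:Int)) = pvU4 k := by
  rw [pvU4]
  rw [show (pvI k) = Finset.Icc 1 k from rfl]
  rw [Finset.sum_filter]
  apply Finset.sum_congr rfl
  intro a ha
  unfold pvE
  rw [show a * a * a = a ^ 3 by ring]

-- pvE only depends on the product
lemma pvE_eq (k x y z x' y' z' : Int) (h : x * y * z = x' * y' * z') :
    pvE k x y z = pvE k x' y' z' := by
  unfold pvE
  rw [h]

lemma pvIte_sum (P : Prop) [Decidable P] (t : Finset Int) (f : Int → Int) :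
    (∑ c ∈ t, if P then f c else 0) = if P then ∑ c ∈ t, f c else 0 := by
  split_ifs <;> simp

-- splitting a symmetric double sum into above/below/on the diagonal
lemma pvPair_split (s : Finset Int) (f : Int → Int → Int) :
    (∑ x ∈ s, ∑ y ∈ s, f x y)
      = (∑ x ∈ s, ∑ y ∈ s.filter (x < ·), f x y)
      + (∑ x ∈ s, ∑ y ∈ s.filter (x < ·), f y x)
      + (∑ x ∈ s, f x x) := by
  have key : ∀ x ∈ s, (∑ y ∈ s, f x y)
      = (∑ y ∈ s, if x < y then f x y else 0)
      + (∑ y ∈ s, if y < x then f x y else 0)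
      + (∑ y ∈ s, if y = x then f x y else 0) := by
    intro x hx
    rw [← Finset.sum_add_distrib, ← Finset.sum_add_distrib]
    apply Finset.sum_congr rfl
    intro y hy
    rcases lt_trichotomy x y with h | h | h
    · rw [if_pos h, if_neg (by omega), if_neg (by omega)]; ring
    · rw [if_neg (by omega), if_neg (by omega), if_pos (by omega)]; ring
    · rw [if_neg (by omega), if_pos h, if_neg (by omega)]; ring
  rw [Finset.sum_congr rfl key, Finset.sum_add_distrib, Finset.sum_add_distrib]
  congr 1
  · congr 1
    · apply Finset.sum_congr rfl
      intro x hx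
      rw [Finset.sum_filter]
    · rw [Finset.sum_comm]
      apply Finset.sum_congr rfl
      intro x hx
      rw [Finset.sum_filter]
  · apply Finset.sum_congr rfl
    intro x hx
    rw [Finset.sum_ite_eq' s x (fun y => f x y), if_pos hx]

-- the triple sum splits into 2 · (sum over b < c) + diagonal
lemma pvT_split (k : Int) :
    pvT k = 2 * (∑ a ∈ pvI k, ∑ b ∈ pvI k, ∑ c ∈ (pvI k).filter (b < ·), pvE k a b c)
      + (∑ a ∈ pvI k, ∑ b ∈ pvI k, pvE k a b b) := by
  unfold pvT
  have key : ∀ a ∈ pvI k, (∑ b ∈ pvI k, ∑ c ∈ pvI k, pvE k a b c)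
      = 2 * (∑ b ∈ pvI k, ∑ c ∈ (pvI k).filter (b < ·), pvE k a b c)
      + (∑ b ∈ pvI k, pvE k a b b) := by
    intro a ha
    rw [pvPair_split (pvI k) (fun b c => pvE k a b c)]
    have h2 : (∑ b ∈ pvI k, ∑ c ∈ (pvI k).filter (b < ·), pvE k a c b)
        = ∑ b ∈ pvI k, ∑ c ∈ (pvI k).filter (b < ·), pvE k a b c := by
      apply Finset.sum_congr rfl
      intro b hb
      apply Finset.sum_congr rfl
      intro c hc
      exact pvE_eq k a c b a b c (by ring)
    rw [h2]
    ring
  rw [Finset.sum_congr rfl key, Finset.sum_add_distrib, ← Finset.mul_sum]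

-- diagonal part
lemma pvDg (k : Int) :
    (∑ a ∈ pvI k, ∑ b ∈ pvI k, pvE k a b b) = pvU3 k + pvU2 k + pvU4 k := by
  rw [pvPair_split (pvI k) (fun a b => pvE k a b b), pvU3, pvU2, pvU4]
  congr 1
  congr 1
  apply Finset.sum_congr rfl
  intro a ha
  apply Finset.sum_congr rfl
  intro b hb
  exact pvE_eq k b a a a a b (by ring)

-- the five-way split of pvE by the position of a relative to b < c
lemma pvFive (k a b c : Int) (hbc : b < c) :
    pvE k a b c
      = (if a < b then pvE k a b c else 0)
      + (if a = b then pvE k a b c else 0)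
      + (if b < a ∧ a < c then pvE k a b c else 0)
      + (if a = c then pvE k a b c else 0)
      + (if c < a then pvE k a b c else 0) := by
  rcases lt_trichotomy a b with h | h | h
  · rw [if_pos h, if_neg (by omega), if_neg (by rintro ⟨h1, h2⟩; omega),
      if_neg (by omega), if_neg (by omega)]
    ring
  · rw [if_neg (by omega), if_pos (by omega), if_neg (by rintro ⟨h1, h2⟩; omega),
      if_neg (by omega), if_neg (by omega)]
    ring
  · rcases lt_trichotomy a c with h' | h' | h'
    · rw [if_neg (by omega), if_neg (by omega), if_pos ⟨h, h'⟩, if_neg (by omega),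
        if_neg (by omega)]
      ring
    · rw [if_neg (by omega), if_neg (by omega), if_neg (by rintro ⟨h1, h2⟩; omega),
        if_pos (by omega), if_neg (by omega)]
      ring
    · rw [if_neg (by omega), if_neg (by omega), if_neg (by rintro ⟨h1, h2⟩; omega),
        if_neg (by omega), if_pos h']
      ring

-- the ordered part: sum over b < c of pvE, a free
lemma pvV (k : Int) :
    (∑ a ∈ pvI k, ∑ b ∈ pvI k, ∑ c ∈ (pvI k).filter (b < ·), pvE k a b c)
      = 3 * pvU1 k + pvU2 k + pvU3 k := by
  have key : ∀ a ∈ pvI k, ∀ b ∈ pvI k,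
      (∑ c ∈ (pvI k).filter (b < ·), pvE k a b c)
      = (∑ c ∈ (pvI k).filter (b < ·), if a < b then pvE k a b c else 0)
      + (∑ c ∈ (pvI k).filter (b < ·), if a = b then pvE k a b c else 0)
      + (∑ c ∈ (pvI k).filter (b < ·), if b < a ∧ a < c then pvE k a b c else 0)
      + (∑ c ∈ (pvI k).filter (b < ·), if a = c then pvE k a b c else 0)
      + (∑ c ∈ (pvI k).filter (b < ·), if c < a then pvE k a b c else 0) := by
    intro a ha b hb
    rw [← Finset.sum_add_distrib, ← Finset.sum_add_distrib, ← Finset.sum_add_distrib,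
      ← Finset.sum_add_distrib]
    apply Finset.sum_congr rfl
    intro c hc
    rw [Finset.mem_filter] at hc
    exact pvFive k a b c hc.2
  calc (∑ a ∈ pvI k, ∑ b ∈ pvI k, ∑ c ∈ (pvI k).filter (b < ·), pvE k a b c)
      = (∑ a ∈ pvI k, ∑ b ∈ pvI k,
          ((∑ c ∈ (pvI k).filter (b < ·), if a < b then pvE k a b c else 0)
          + (∑ c ∈ (pvI k).filter (b < ·), if a = b then pvE k a b c else 0)
          + (∑ c ∈ (pvI k).filter (b < ·), if b < a ∧ a < c then pvE k a b c else 0)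
          + (∑ c ∈ (pvI k).filter (b < ·), if a = c then pvE k a b c else 0)
          + (∑ c ∈ (pvI k).filter (b < ·), if c < a then pvE k a b c else 0))) := by
        apply Finset.sum_congr rfl
        intro a ha
        apply Finset.sum_congr rfl
        intro b hb
        exact key a ha b hb
    _ = pvU1 k + pvU2 k + pvU1 k + pvU3 k + pvU1 k := by
        simp only [Finset.sum_add_distrib]
        congr 1
        congr 1
        congr 1
        congr 1
        · -- V1 = U1
          rw [pvU1]
          apply Finset.sum_congr rfl
          intro a ha
          rw [Finset.sum_filter]
          apply Finset.sum_congr rfl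
          intro b hb
          rw [pvIte_sum]
        · -- V2 = U2
          rw [pvU2, Finset.sum_comm]
          apply Finset.sum_congr rfl
          intro b hb
          have h1 : ∀ a ∈ pvI k,
              (∑ c ∈ (pvI k).filter (b < ·), if a = b then pvE k a b c else 0)
              = (if a = b then (∑ c ∈ (pvI k).filter (b < ·), pvE k a b c) else 0) :=
            fun a _ => pvIte_sum _ _ _
          rw [Finset.sum_congr rfl h1,
            Finset.sum_ite_eq' (pvI k) b (fun a => ∑ c ∈ (pvI k).filter (b < ·), pvE k a b c),
            if_pos hb]
        · -- V3 = U1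
          rw [pvU1]
          simp only [Finset.sum_filter]
          conv_lhs => rw [Finset.sum_comm]
          apply Finset.sum_congr rfl
          intro x hx
          apply Finset.sum_congr rfl
          intro y hy
          by_cases hxy : x < y
          · rw [if_pos hxy]
            apply Finset.sum_congr rfl
            intro c hc
            have he : pvE k y x c = pvE k x y c := pvE_eq k y x c x y c (by ring)
            split_ifs <;> first | (exfalso; omega) | rw [he] | rfl
          · rw [if_neg hxy]
            apply Finset.sum_eq_zero
            intro c hc
            split_ifs <;> first | rfl | (exfalso; omega)
        · -- V4 = U3
          rw [pvU3]
          simp only [Finset.sum_filter]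
          conv_lhs => rw [Finset.sum_comm]
          apply Finset.sum_congr rfl
          intro b hb
          conv_lhs => rw [Finset.sum_comm]
          have h1 : ∀ c ∈ pvI k,
              (∑ a ∈ pvI k, if b < c then (if a = c then pvE k a b c else 0) else 0)
              = (if b < c then pvE k c b c else 0) := by
            intro c hc
            rw [pvIte_sum]
            congr 1
            rw [Finset.sum_ite_eq' (pvI k) c (fun a => pvE k a b c), if_pos hc]
          rw [Finset.sum_congr rfl h1]
          apply Finset.sum_congr rfl
          intro c hc
          have he : pvE k c b c = pvE k b c c := pvE_eq k c b c b c c (by ring)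
          split_ifs <;> first | rw [he] | rfl
        · -- V5 = U1
          rw [pvU1]
          simp only [Finset.sum_filter]
          conv_lhs => rw [Finset.sum_comm]
          apply Finset.sum_congr rfl
          intro b hb
          conv_lhs => rw [Finset.sum_comm]
          have h1 : ∀ c ∈ pvI k,
              (∑ a ∈ pvI k, if b < c then (if c < a then pvE k a b c else 0) else 0)
              = (if b < c then (∑ a ∈ pvI k, if c < a then pvE k b c a else 0) else 0) := by
            intro c hc
            rw [pvIte_sum]
            congr 1
            apply Finset.sum_congr rfl
            intro a ha
            have he : pvE k a b c = pvE k b c a := pvE_eq k a b c b c a (by ring)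
            split_ifs <;> first | rw [he] | rfl
          rw [Finset.sum_congr rfl h1]
    _ = 3 * pvU1 k + pvU2 k + pvU3 k := by ring

-- combinatorial core: the triple count decomposes into the four symmetry classes
lemma pvT_core (k : Int) :
    pvT k = 6 * pvU1 k + 3 * pvU2 k + 3 * pvU3 k + pvU4 k := by
  rw [pvT_split, pvV, pvDg]
  ring

-- splitting an Icc sum at an intermediate point
lemma pvIcc_split (a b c : Int) (f : Int → Int) (h1 : a - 1 ≤ b) (h2 : b ≤ c) :
    (∑ x ∈ Finset.Icc a c, f x)
      = (∑ x ∈ Finset.Icc a b, f x) + (∑ x ∈ Finset.Icc (b + 1) c, f x) := by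
  rw [show Finset.Icc a c = Finset.Icc a b ∪ Finset.Icc (b + 1) c by
      ext x; simp only [Finset.mem_union, Finset.mem_Icc]; omega]
  exact Finset.sum_union (by
    rw [Finset.disjoint_left]
    intro x hx hx'
    rw [Finset.mem_Icc] at hx hx'
    omega)

lemma pvDivDiv (k a b : Int) (hk : 0 ≤ k) (ha : 0 ≤ a) : k / a / b = k / (a * b) :=
  Int.ediv_ediv_of_nonneg ha

-- the hyperbola identity: for 0 ≤ s with s² ≤ m < (s+1)², twice the sum up to s
-- minus s² is the full divisor sum
lemma pvHyperbola (m s : Int) (hm : 0 ≤ m) (hs0 : 0 ≤ s) (h1 : s * s ≤ m)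
    (h2 : m < (s + 1) * (s + 1)) :
    2 * (∑ j ∈ Finset.Icc 1 s, m / j) - s * s = ∑ b ∈ Finset.Icc 1 m, m / b := by
  rcases eq_or_lt_of_le hm with hm0 | hm1
  · have hs : s = 0 := by nlinarith
    subst hs
    simp [← hm0]
  have hm' : 1 ≤ m := hm1
  have hs1 : 1 ≤ s := by nlinarith
  have hsm : s ≤ m := by nlinarith
  -- expand m / b into a count of c values
  have hcount : ∀ b : Int, 1 ≤ b → m / b = ∑ c ∈ Finset.Icc 1 m, pvE m 1 b c := by
    intro b hb
    rw [show Finset.Icc (1:Int) m = pvI m from rfl, pvCount_c m 1 b hm' (by omega) hb,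
      one_mul]
  have hcount' : ∀ c : Int, 1 ≤ c → m / c = ∑ b ∈ Finset.Icc 1 m, pvE m 1 b c := by
    intro c hc
    have h0 : (∑ b ∈ Finset.Icc 1 m, pvE m 1 b c) = ∑ b ∈ Finset.Icc 1 m, pvE m 1 c b :=
      Finset.sum_congr rfl (fun b _ => pvE_eq m 1 b c 1 c b (by ring))
    rw [h0, show Finset.Icc (1:Int) m = pvI m from rfl, pvCount_c m 1 c hm' (by omega) hc,
      one_mul]
  -- the inner-truncation step: for b > s the c-sum is supported on c ≤ s
  have htrunc : ∀ b ∈ Finset.Icc (s + 1) m,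
      (∑ c ∈ Finset.Icc 1 m, pvE m 1 b c) = ∑ c ∈ Finset.Icc 1 s, pvE m 1 b c := by
    intro b hb
    rw [Finset.mem_Icc] at hb
    rw [pvIcc_split 1 s m _ (by omega) hsm]
    have : (∑ c ∈ Finset.Icc (s + 1) m, pvE m 1 b c) = 0 := by
      apply Finset.sum_eq_zero
      intro c hc
      rw [Finset.mem_Icc] at hc
      unfold pvE
      rw [if_neg]
      nlinarith
    rw [this, add_zero]
  -- the square block
  have hsq : (∑ c ∈ Finset.Icc 1 s, ∑ b ∈ Finset.Icc 1 s, pvE m 1 b c) = s * s := by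
    have hrow : ∀ c ∈ Finset.Icc 1 s, (∑ b ∈ Finset.Icc 1 s, pvE m 1 b c) = s := by
      intro c hc
      rw [Finset.mem_Icc] at hc
      have hone : (∑ b ∈ Finset.Icc 1 s, pvE m 1 b c) = ∑ _b ∈ Finset.Icc 1 s, (1:Int) :=
        Finset.sum_congr rfl (fun b hb => by
          rw [Finset.mem_Icc] at hb
          unfold pvE
          rw [if_pos (by nlinarith)])
      rw [hone, Finset.sum_const, Int.card_Icc, nsmul_eq_mul, mul_one]
      omega
    rw [Finset.sum_congr rfl hrow, Finset.sum_const, Int.card_Icc, nsmul_eq_mul]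
    have hcast : (((s + 1 - 1).toNat : Int)) = s := by omega
    rw [hcast]
  calc 2 * (∑ j ∈ Finset.Icc 1 s, m / j) - s * s
      = (∑ j ∈ Finset.Icc 1 s, m / j)
        + ((∑ j ∈ Finset.Icc 1 s, m / j) - s * s) := by ring
    _ = (∑ j ∈ Finset.Icc 1 s, m / j)
        + ((∑ c ∈ Finset.Icc 1 s, ∑ b ∈ Finset.Icc 1 m, pvE m 1 b c)
          - (∑ c ∈ Finset.Icc 1 s, ∑ b ∈ Finset.Icc 1 s, pvE m 1 b c)) := by
        rw [hsq]
        congr 2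
        apply Finset.sum_congr rfl
        intro c hc
        rw [Finset.mem_Icc] at hc
        exact hcount' c hc.1
    _ = (∑ j ∈ Finset.Icc 1 s, m / j)
        + (∑ c ∈ Finset.Icc 1 s, ∑ b ∈ Finset.Icc (s + 1) m, pvE m 1 b c) := by
        congr 1
        rw [← Finset.sum_sub_distrib]
        apply Finset.sum_congr rfl
        intro c hc
        rw [pvIcc_split 1 s m (fun b => pvE m 1 b c) (by omega) hsm]
        ring
    _ = (∑ j ∈ Finset.Icc 1 s, m / j)
        + (∑ b ∈ Finset.Icc (s + 1) m, ∑ c ∈ Finset.Icc 1 m, pvE m 1 b c) := by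
        congr 1
        rw [Finset.sum_comm]
        apply Finset.sum_congr rfl
        intro b hb
        rw [htrunc b hb]
    _ = (∑ b ∈ Finset.Icc 1 s, ∑ c ∈ Finset.Icc 1 m, pvE m 1 b c)
        + (∑ b ∈ Finset.Icc (s + 1) m, ∑ c ∈ Finset.Icc 1 m, pvE m 1 b c) := by
        congr 1
        apply Finset.sum_congr rfl
        intro j hj
        rw [Finset.mem_Icc] at hj
        exact hcount j hj.1
    _ = ∑ b ∈ Finset.Icc 1 m, ∑ c ∈ Finset.Icc 1 m, pvE m 1 b c := by
        rw [pvIcc_split 1 s m _ (by omega) hsm]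
    _ = ∑ b ∈ Finset.Icc 1 m, m / b := by
        apply Finset.sum_congr rfl
        intro b hb
        rw [Finset.mem_Icc] at hb
        exact (hcount b hb.1).symm

-- the pair-count loop: invariant and final value
lemma pairCountLoop_spec (m : Int) (hm : 0 ≤ m) :
    ∀ n b t s, (m + 1 - b).toNat = n → 1 ≤ b → s = b - 1 → (b - 1) * (b - 1) ≤ m →
      t = (∑ j ∈ Finset.Icc 1 (b - 1), m / j) →
      ∃ s', b - 1 ≤ s' ∧ s' * s' ≤ m ∧ m < (s' + 1) * (s' + 1) ∧
        pairCountLoop m b t s = (∑ j ∈ Finset.Icc 1 s', m / j, s') := by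
  intro n
  induction n using Nat.strong_induction_on with
  | _ n ih =>
    intro b t s hn hb hs hbm ht
    rw [pairCountLoop]
    split_ifs with h
    · have hbm' : b ≤ m := by nlinarith
      obtain ⟨s', h1, h2, h3, h4⟩ := ih (m + 1 - (b + 1)).toNat (by omega)
        (b + 1) (t + PySem.Int.floordiv m b) b rfl (by omega) (by omega)
        (by have hb1 : b + 1 - 1 = b := by ring
            rw [hb1]; exact h)
        (by
          rw [ht, PySem.Int.floordiv_eq_ediv_of_pos (by omega : (0:Int) < b),
            show b + 1 - 1 = b from by ring,
            pvIcc_split 1 (b - 1) b (fun j => m / j) (by omega) (by omega)]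
          simp [show b - 1 + 1 = b from by ring])
      exact ⟨s', by omega, h2, h3, h4⟩
    · exact ⟨b - 1, le_refl _, hbm, by nlinarith, by rw [ht, hs]⟩

lemma pairCount_eq (m : Int) (hm : 0 ≤ m) :
    pairCount m = ∑ b ∈ Finset.Icc 1 m, m / b := by
  obtain ⟨s', h1, h2, h3, h4⟩ := pairCountLoop_spec m hm (m + 1 - 1).toNat 1 0 0 rfl
    (by omega) (by ring) (by simpa using hm) (by simp)
  unfold pairCount
  rw [h4]
  exact pvHyperbola m s' hm (by omega) h2 h3

-- the outer block loop sums pairCount (k / a) over a = 1..k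
lemma pvBlock_loop (k : Int) (hk : 1 ≤ k) :
    ∀ (fuel : Nat) (a res : Int), 1 ≤ a → (k + 1 - a).toNat < fuel →
      solveAltLoop k fuel a res = res + ∑ x ∈ Finset.Icc a k, pairCount (k / x) := by
  intro fuel
  induction fuel with
  | zero => intro a res _ hlt; omega
  | succ fuel ih =>
    intro a res ha hlt
    rw [solveAltLoop]
    split_ifs with hak
    · simp only
      have hq1 : 1 ≤ k / a := by
        rw [Int.le_ediv_iff_mul_le (by omega : (0:Int) < a)]
        omega
      rw [PySem.Int.floordiv_eq_ediv_of_pos (by omega : (0:Int) < a),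
        PySem.Int.floordiv_eq_ediv_of_pos (by omega : (0:Int) < k / a)]
      have ha2a : a ≤ k / (k / a) := by
        rw [Int.le_ediv_iff_mul_le (by omega : (0:Int) < k / a)]
        calc a * (k / a) = k / a * a := by ring
          _ ≤ k := Int.ediv_mul_le k (by omega)
      have ha2k : k / (k / a) ≤ k := Int.ediv_le_self _ (by omega)
      rw [ih (k / (k / a) + 1) _ (by omega) (by omega)]
      have hblock : (∑ x ∈ Finset.Icc a (k / (k / a)), pairCount (k / x))
          = (k / (k / a) - a + 1) * pairCount (k / a) := by
        have hconst : (∑ x ∈ Finset.Icc a (k / (k / a)), pairCount (k / x))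
            = ∑ _x ∈ Finset.Icc a (k / (k / a)), pairCount (k / a) :=
          Finset.sum_congr rfl (fun x hx => by
            rw [Finset.mem_Icc] at hx
            have hx1 : 1 ≤ x := by omega
            have hle : k / x ≤ k / a := pvDiv_antitone k a x (by omega) (by omega) hx.1
            have hge : k / a ≤ k / x := by
              rw [Int.le_ediv_iff_mul_le (by omega : (0:Int) < x)]
              have := (Int.le_ediv_iff_mul_le (by omega : (0:Int) < k / a)).mp
                (le_refl (k / (k / a)))
              nlinarith [hx.2, hq1]
            rw [show k / x = k / a from le_antisymm hle hge])
        rw [hconst, Finset.sum_const, Int.card_Icc, nsmul_eq_mul,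
          show (((k / (k / a) + 1 - a).toNat : Int)) = k / (k / a) + 1 - a from by omega]
        ring
      rw [pvIcc_split a (k / (k / a)) k (fun x => pairCount (k / x)) (by omega) ha2k,
        hblock]
      ring
    · rw [Finset.Icc_eq_empty (by omega), Finset.sum_empty, add_zero]

lemma pvAlt_sum (k : Int) (hk : 1 ≤ k) :
    solve_alt k = ∑ a ∈ Finset.Icc 1 k, ∑ b ∈ Finset.Icc 1 (k / a), k / (a * b) := by
  unfold solve_alt
  rw [pvBlock_loop k hk (k.toNat + 1) 1 0 (by omega) (by omega), zero_add]
  apply Finset.sum_congr rfl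
  intro a ha
  rw [Finset.mem_Icc] at ha
  have hka : 0 ≤ k / a := Int.ediv_nonneg (by omega) (by omega)
  rw [pairCount_eq (k / a) hka]
  apply Finset.sum_congr rfl
  intro b hb
  rw [Finset.mem_Icc] at hb
  exact pvDivDiv k a b (by omega) (by omega)

lemma pvAlt_T (k : Int) (hk : 1 ≤ k) : solve_alt k = pvT k := by
  rw [pvAlt_sum k hk]
  unfold pvT pvI
  apply Finset.sum_congr rfl
  intro a ha
  rw [Finset.mem_Icc] at ha
  rw [Finset.sum_subset (Finset.Icc_subset_Icc (le_refl 1) (Int.ediv_le_self a (by omega)))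
    (by
      intro b hb hnb
      rw [Finset.mem_Icc] at hb
      have hba : k / a < b := by
        by_contra hc
        exact hnb (Finset.mem_Icc.mpr ⟨hb.1, by omega⟩)
      have : k < b * a := (Int.ediv_lt_iff_lt_mul (by omega : (0:Int) < a)).mp hba
      exact Int.ediv_eq_zero_of_lt (by omega) (by nlinarith))]
  apply Finset.sum_congr rfl
  intro b hb
  rw [Finset.mem_Icc] at hb
  rw [show Finset.Icc (1:Int) k = pvI k from rfl, pvCount_c k a b hk (by omega) (by omega)]

-- A's value for positive k
lemma pvSolve_eq_pos (k : Int) (hk : 1 ≤ k) : solve k = solve_alt k := by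
  simp only [solve]
  rw [pvL1_sum k 0 hk, pvL2_sum k _ hk, pvL3_sum k _ hk, pvL4_sum k _ hk]
  rw [pvU1_eq k hk, pvU2_eq k hk, pvU3_eq k hk, pvU4_eq k hk, pvAlt_T k hk, pvT_core k]
  ring

lemma pvSolve_eq_neg (k : Int) (hk : k ≤ 0) : solve k = solve_alt k := by
  have hnil : PySem.List.pyRange 1 (k + 1) 1 = [] :=
    PySem.List.pyRange_one_eq_nil (by omega)
  simp [solve, solve_alt, hnil, solveL1, solveL2, solveL3, solveL4,
    solveAltLoop, show ¬(1:Int) ≤ k by omega]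

-- ===== VERDICT (by name: the statement is the Claim_ definition above) =====
theorem solve_spec : Claim_equal_solve := by
  intro k _
  unfold Spec_solve
  by_cases hk : 1 ≤ k
  · exact pvSolve_eq_pos k hk
  · exact pvSolve_eq_neg k (by omega)
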